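-- pv_equiv track=rewrite | github.com/ASim-Null/session_12 | db_utils.py | _map_values
-- ===== SOURCE A (Python) =====
-- def _map_values(schedule):
--     mapped = []
--     for item in schedule:
--         mapped.append({
--             'name': item[0],
--             '12-13': 'Not Available' if item[1] else 'Available',
--             '13-14': 'Not Available' if item[2] else 'Available',
--             '14-15': 'Not Available' if item[3] else 'Available',
--             '15-16': 'Not Available' if item[4] else 'Available',
--             '16-17': 'Not Available' if item[5] else 'Available',
--             '17-18': 'Not Available' if item[6] else 'Available',
--         })
--     return mapped
-- ===== SOURCE B (Python) =====
-- _KEYS = ('name', '12-13', '13-14', '14-15', '15-16', '16-17', '17-18')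
-- _STATUS = ('Available', 'Not Available')
--
-- def _map_values(schedule):
--     if not schedule:
--         return []
--     item = schedule[0]
--     vals = (item[0],) + tuple(_STATUS[v != 0] for v in item[1:7])
--     return [dict(zip(_KEYS, vals))] + _map_values(schedule[1:])
-- ===== Notes on version B (the rewrite author's own statement) =====
-- stated objective: alternative
-- what changed: Recursive head/tail decomposition instead of A's accumulator loop; each row is built by zipping a key tuple with a value tuple whose statuses come from boolean-indexing a two-element status table, instead of A's hand-unrolled dict literal of seven conditional expressions.
import Mathlib
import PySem

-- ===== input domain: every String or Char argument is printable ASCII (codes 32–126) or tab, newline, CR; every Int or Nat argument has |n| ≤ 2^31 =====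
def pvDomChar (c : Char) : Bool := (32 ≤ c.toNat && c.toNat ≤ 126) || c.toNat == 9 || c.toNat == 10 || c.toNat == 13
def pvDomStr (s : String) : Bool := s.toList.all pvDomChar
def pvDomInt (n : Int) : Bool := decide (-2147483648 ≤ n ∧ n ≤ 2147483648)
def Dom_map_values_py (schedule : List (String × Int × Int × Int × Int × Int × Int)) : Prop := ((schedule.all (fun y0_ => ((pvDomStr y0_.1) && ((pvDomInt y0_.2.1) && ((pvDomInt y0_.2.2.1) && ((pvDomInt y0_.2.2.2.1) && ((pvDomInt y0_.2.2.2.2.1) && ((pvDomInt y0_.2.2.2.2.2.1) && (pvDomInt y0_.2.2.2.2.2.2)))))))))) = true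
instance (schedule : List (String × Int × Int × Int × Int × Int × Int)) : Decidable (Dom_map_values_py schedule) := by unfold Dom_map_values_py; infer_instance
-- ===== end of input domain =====

-- B rebuilds the list recursively, zipping a key tuple with a status-table-indexed value tuple, instead of A's loop appending a hand-unrolled dict literal (objective: alternative).

-- ===== PORT A =====
def map_values_py (schedule : List (String × Int × Int × Int × Int × Int × Int)) : List (List (String × String)) :=
  schedule.foldl (fun mapped item =>
    mapped ++ [[("name", item.1),
                ("12-13", if item.2.1 ≠ 0 then "Not Available" else "Available"),
                ("13-14", if item.2.2.1 ≠ 0 then "Not Available" else "Available"),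
                ("14-15", if item.2.2.2.1 ≠ 0 then "Not Available" else "Available"),
                ("15-16", if item.2.2.2.2.1 ≠ 0 then "Not Available" else "Available"),
                ("16-17", if item.2.2.2.2.2.1 ≠ 0 then "Not Available" else "Available"),
                ("17-18", if item.2.2.2.2.2.2 ≠ 0 then "Not Available" else "Available")]]) []

-- ===== PORT B =====
-- module-level key and status tables from Source B
def pvKeys : List String := ["name", "12-13", "13-14", "14-15", "15-16", "16-17", "17-18"]

-- _STATUS[v != 0]: indexing the two-element status tuple by the boolean (exact: False→0, True→1)
def pvStatus (v : Int) : String := if v ≠ 0 then "Not Available" else "Available"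

def map_values_py_alt (schedule : List (String × Int × Int × Int × Int × Int × Int)) : List (List (String × String)) :=
  match schedule with
  | [] => []
  | item :: rest =>
    -- vals = (item[0],) + tuple(_STATUS[v != 0] for v in item[1:7])
    let vals := item.1 :: ([item.2.1, item.2.2.1, item.2.2.2.1, item.2.2.2.2.1,
                            item.2.2.2.2.2.1, item.2.2.2.2.2.2].map pvStatus)
    -- dict(zip(_KEYS, vals)): keys are distinct, so items = the zipped pairs in order
    List.zip pvKeys vals :: map_values_py_alt rest

-- ===== PRECONDITION & SPEC =====
def Spec_map_values_py (schedule : List (String × Int × Int × Int × Int × Int × Int)) (out : List (List (String × String))) : Prop := out = map_values_py_alt schedule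
instance (schedule : List (String × Int × Int × Int × Int × Int × Int)) (out : List (List (String × String))) : Decidable (Spec_map_values_py schedule out) := by unfold Spec_map_values_py; infer_instance

-- ===== CLAIM =====
def Claim_equal_map_values_py : Prop := ∀ (schedule : List (String × Int × Int × Int × Int × Int × Int)), Dom_map_values_py schedule → Spec_map_values_py schedule (map_values_py schedule)

-- ===== LEMMAS AND PROOFS =====
theorem map_values_foldl_eq (schedule : List (String × Int × Int × Int × Int × Int × Int))
    (acc : List (List (String × String))) :
    schedule.foldl (fun mapped item =>
      mapped ++ [[("name", item.1),
                  ("12-13", if item.2.1 ≠ 0 then "Not Available" else "Available"),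
                  ("13-14", if item.2.2.1 ≠ 0 then "Not Available" else "Available"),
                  ("14-15", if item.2.2.2.1 ≠ 0 then "Not Available" else "Available"),
                  ("15-16", if item.2.2.2.2.1 ≠ 0 then "Not Available" else "Available"),
                  ("16-17", if item.2.2.2.2.2.1 ≠ 0 then "Not Available" else "Available"),
                  ("17-18", if item.2.2.2.2.2.2 ≠ 0 then "Not Available" else "Available")]]) acc =
    acc ++ map_values_py_alt schedule := by
  induction schedule generalizing acc with
  | nil => simp [map_values_py_alt]
  | cons item rest ih =>
    simp only [List.foldl_cons, map_values_py_alt]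
    rw [ih]
    simp [pvKeys, pvStatus, List.zip]

-- ===== VERDICT =====
theorem map_values_py_spec : Claim_equal_map_values_py := by
  intro schedule _
  unfold Spec_map_values_py map_values_py
  simpa using map_values_foldl_eq schedule []
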